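-- pv_equiv track=rewrite | github.com/thoresensandmann432-source/argoss | argos_deploy/backups/auto_20260411_175902/src/connectivity/sim800c.py | _parse_sms_list
-- ===== SOURCE A (Python) =====
-- from typing import Any, Callable, Optional
--
-- def _parse_sms_list(raw: str) -> list[dict[str, Any]]:
--     """Парсинг ответа AT+CMGL."""
--     messages = []
--     lines = raw.splitlines()
--     i = 0
--     while i < len(lines):
--         line = lines[i]
--         if line.startswith("+CMGL:"):
--             # +CMGL: index,status,sender,,"timestamp"
--             parts = line.split(",")
--             try:
--                 idx = parts[0].split(":")[1].strip()
--                 sender = parts[2].strip().strip('"')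
--                 timestamp = parts[4].strip().strip('"') if len(parts) > 4 else ""
--                 body = lines[i + 1] if i + 1 < len(lines) else ""
--                 messages.append(
--                     {
--                         "index": idx,
--                         "sender": sender,
--                         "timestamp": timestamp,
--                         "text": body.strip(),
--                         "command": body.strip(),  # text = команда для Аргоса
--                     }
--                 )
--                 i += 2
--                 continue
--             except Exception:
--                 pass
--         i += 1
--     return messages
-- ===== SOURCE B (Python) =====
-- def _parse_header(line: str):
--     """Fields (index, sender, timestamp) of a '+CMGL:' header line, or None if malformed."""
--     parts = line.split(",")
--     try:
--         idx = parts[0].split(":")[1].strip()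
--         sender = parts[2].strip().strip('"')
--         timestamp = parts[4].strip().strip('"') if len(parts) > 4 else ""
--         return (idx, sender, timestamp)
--     except IndexError:
--         return None
--
--
-- def _parse_sms_list(raw: str):
--     """Parse AT+CMGL response with a single-pass state machine:
--     a pending parsed header consumes the following line as the message body."""
--     messages = []
--     pending = None
--     for line in raw.splitlines():
--         if pending is not None:
--             idx, sender, timestamp = pending
--             text = line.strip()
--             messages.append(
--                 {
--                     "index": idx,
--                     "sender": sender,
--                     "timestamp": timestamp,
--                     "text": text,
--                     "command": text,
--                 }
--             )
--             pending = None
--         elif line.startswith("+CMGL:"):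
--             pending = _parse_header(line)
--     if pending is not None:
--         idx, sender, timestamp = pending
--         messages.append(
--             {
--                 "index": idx,
--                 "sender": sender,
--                 "timestamp": timestamp,
--                 "text": "",
--                 "command": "",
--             }
--         )
--     return messages
-- ===== Notes on version B (the rewrite author's own statement) =====
-- stated objective: alternative
-- what changed: Replaces A's index-based while loop (with lines[i+1] lookahead and i += 2 skipping) by a single forward pass in state-machine form: a pending parsed header stored in the state consumes the following line as the message body, with a final flush for a trailing header.
import Mathlib
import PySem

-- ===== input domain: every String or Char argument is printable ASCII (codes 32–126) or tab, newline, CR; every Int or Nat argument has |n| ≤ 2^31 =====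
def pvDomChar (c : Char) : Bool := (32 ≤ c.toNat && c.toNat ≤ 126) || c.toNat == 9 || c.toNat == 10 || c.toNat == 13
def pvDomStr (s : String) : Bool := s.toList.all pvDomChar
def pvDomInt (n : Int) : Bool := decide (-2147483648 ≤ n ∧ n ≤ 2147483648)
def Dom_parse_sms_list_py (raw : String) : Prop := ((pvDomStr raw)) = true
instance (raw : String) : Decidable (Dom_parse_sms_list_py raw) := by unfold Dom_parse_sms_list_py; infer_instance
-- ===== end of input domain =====

-- B replaces A's index-based while loop (lines[i+1] lookahead, i += 2 skipping) by a
-- single-pass state machine (a pending parsed header consumes the next line as body); objective: alternative decomposition.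

-- shared primitive wrapper: Python str.split(sep) with a non-empty separator
def pvSplit (s sep : String) : List String := (PySem.Str.split? s sep).getD []

-- ===== PORT A =====
-- the field extraction of A's try-block: some fields, or none where Python raises (→ except: pass)
def pvTryA (line : String) : Option (String × String × String) :=
  let parts := pvSplit line ","
  match PySem.List.pyGet? parts 0 with
  | none => none
  | some p0 =>
    match PySem.List.pyGet? (pvSplit p0 ":") 1 with
    | none => none
    | some i1 =>
      let idx := PySem.Str.strip i1
      match PySem.List.pyGet? parts 2 with
      | none => none
      | some p2 =>
        let sender := PySem.Str.stripChars (PySem.Str.strip p2) "\""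
        if 4 < parts.length then
          match PySem.List.pyGet? parts 4 with
          | none => none   -- unreachable: guarded by len(parts) > 4
          | some p4 => some (idx, sender, PySem.Str.stripChars (PySem.Str.strip p4) "\"")
        else some (idx, sender, "")

-- A's while loop: recursion over the remaining lines; msgs is the accumulator
def pvLoopA : List String → List (List (String × String)) → List (List (String × String))
  | [], msgs => msgs
  | line :: rest, msgs =>
    if PySem.Str.startswith line "+CMGL:" then
      match pvTryA line with
      | none => pvLoopA rest msgs          -- except Exception: pass; i += 1
      | some (idx, sender, timestamp) =>
        -- body = lines[i + 1] if i + 1 < len(lines) else ""; append; i += 2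
        match rest with
        | [] =>
          msgs ++ [[("index", idx), ("sender", sender), ("timestamp", timestamp),
                    ("text", PySem.Str.strip ""), ("command", PySem.Str.strip "")]]
        | body :: rest2 =>
          pvLoopA rest2 (msgs ++ [[("index", idx), ("sender", sender), ("timestamp", timestamp),
                    ("text", PySem.Str.strip body), ("command", PySem.Str.strip body)]])
    else pvLoopA rest msgs

def parse_sms_list_py (raw : String) : List (List (String × String)) :=
  pvLoopA (PySem.Str.splitlines raw) []

-- ===== PORT B =====
-- Source B's _parse_header: fields of a '+CMGL:' header line, or none if malformed
def pvParseHeader (line : String) : Option (String × String × String) :=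
  let parts := pvSplit line ","
  match PySem.List.pyGet? parts 0 with
  | none => none
  | some p0 =>
    match PySem.List.pyGet? (pvSplit p0 ":") 1 with
    | none => none
    | some i1 =>
      let idx := PySem.Str.strip i1
      match PySem.List.pyGet? parts 2 with
      | none => none
      | some p2 =>
        let sender := PySem.Str.stripChars (PySem.Str.strip p2) "\""
        if 4 < parts.length then
          match PySem.List.pyGet? parts 4 with
          | none => none   -- unreachable: guarded by len(parts) > 4
          | some p4 => some (idx, sender, PySem.Str.stripChars (PySem.Str.strip p4) "\"")
        else some (idx, sender, "")

-- one step of Source B's for-loop: state = (pending header fields, messages so far)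
def pvStepB (st : Option (String × String × String) × List (List (String × String)))
    (line : String) : Option (String × String × String) × List (List (String × String)) :=
  match st with
  | (some (idx, sender, timestamp), msgs) =>
    let text := PySem.Str.strip line
    (none, msgs ++ [[("index", idx), ("sender", sender), ("timestamp", timestamp),
                     ("text", text), ("command", text)]])
  | (none, msgs) =>
    if PySem.Str.startswith line "+CMGL:" then (pvParseHeader line, msgs)
    else (none, msgs)

-- final flush: a header on the last line gets an empty body
def pvFlushB (st : Option (String × String × String) × List (List (String × String))) :
    List (List (String × String)) :=
  match st with
  | (none, msgs) => msgs
  | (some (idx, sender, timestamp), msgs) =>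
    msgs ++ [[("index", idx), ("sender", sender), ("timestamp", timestamp),
              ("text", ""), ("command", "")]]

def parse_sms_list_py_alt (raw : String) : List (List (String × String)) :=
  pvFlushB ((PySem.Str.splitlines raw).foldl pvStepB (none, []))

-- ===== PRECONDITION & SPEC =====
def Spec_parse_sms_list_py (raw : String) (out : List (List (String × String))) : Prop := out = parse_sms_list_py_alt raw
instance (raw : String) (out : List (List (String × String))) : Decidable (Spec_parse_sms_list_py raw out) := by unfold Spec_parse_sms_list_py; infer_instance

-- ===== CLAIM (what is proved, stated in full; the proofs are below) =====
def Claim_equal_parse_sms_list_py : Prop := ∀ (raw : String), Dom_parse_sms_list_py raw → Spec_parse_sms_list_py raw (parse_sms_list_py raw)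

-- ===== LEMMAS AND PROOFS =====

-- both ports extract the header fields by the same Python expressions
theorem pvTryA_eq_parseHeader (line : String) : pvTryA line = pvParseHeader line := rfl

-- loop invariant: A's scan from any line list and accumulator equals B's fold (with no
-- pending header) followed by the final flush
theorem pvLoopA_eq_foldB : ∀ (lines : List String) (msgs : List (List (String × String))),
    pvLoopA lines msgs = pvFlushB (lines.foldl pvStepB (none, msgs))
  | [], msgs => rfl
  | line :: rest, msgs => by
    rw [List.foldl_cons]
    by_cases hs : PySem.Str.startswith line "+CMGL:"
    · simp only [pvLoopA, pvStepB, if_pos hs, pvTryA_eq_parseHeader]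
      cases hh : pvParseHeader line with
      | none => exact pvLoopA_eq_foldB rest msgs
      | some t =>
        obtain ⟨idx, sender, timestamp⟩ := t
        cases rest with
        | nil => rfl
        | cons body rest2 =>
          rw [List.foldl_cons]
          simp only [pvStepB]
          exact pvLoopA_eq_foldB rest2 _
    · simp only [pvLoopA, pvStepB, if_neg hs]
      exact pvLoopA_eq_foldB rest msgs
termination_by lines _ => lines.length
decreasing_by all_goals (simp only [List.length_cons]; omega)

-- ===== VERDICT (by name: the statement is the Claim_ definition above) =====
theorem parse_sms_list_py_spec : Claim_equal_parse_sms_list_py := by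
  intro raw _
  unfold Spec_parse_sms_list_py parse_sms_list_py parse_sms_list_py_alt
  exact pvLoopA_eq_foldB _ _
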